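-- pv_equiv track=rewrite | github.com/igpp-ucla/MagPy4 | MagPy4/widgets/mms_data.py | latest_files
-- ===== SOURCE A (Python) =====
-- def latest_files(files):
--     ''' Filters files list so that only latest CDF versions are selected '''
--     files.sort()
--     file_dict = {}
--     for file in files:
--         # Use pre 'v[CDFversion].cdf' info as a key in dict
--         # and update with 'v[CDFversion]' (sorted so latest should be
--         # in dict in the end)
--         items = file.split('_')
--         desc = '_'.join(items[:-1])
--         vers = items[-1]
--         file_dict[desc] = vers
--
--     # Map dictionary key/values back to filenames
--     return ['_'.join([desc, vers]) for desc, vers in file_dict.items()]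
-- ===== SOURCE B (Python) =====
-- def latest_files(files):
--     ''' Filters files list so that only latest CDF versions are selected '''
--     files.sort()
--     # reverse pass: first hit per prefix is the latest version (list is sorted)
--     latest = {}
--     for f in reversed(files):
--         items = f.split('_')
--         desc = '_'.join(items[:-1])
--         if desc not in latest:
--             latest[desc] = items[-1]
--     # forward pass: emit each prefix at its first occurrence, with its latest version
--     out = []
--     seen = set()
--     for f in files:
--         desc = '_'.join(f.split('_')[:-1])
--         if desc not in seen:
--             seen.add(desc)
--             out.append('_'.join([desc, latest[desc]]))
--     return out
-- ===== Notes on version B (the rewrite author's own statement) =====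
-- stated objective: alternative
-- what changed: A builds one dict by overwriting values and reads the result off the dict's insertion order; B never relies on dict insertion-order semantics: a reverse pass records the first (= latest, since sorted) version per prefix, then a forward pass with a seen-set emits each prefix at its first occurrence.
import Mathlib
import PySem

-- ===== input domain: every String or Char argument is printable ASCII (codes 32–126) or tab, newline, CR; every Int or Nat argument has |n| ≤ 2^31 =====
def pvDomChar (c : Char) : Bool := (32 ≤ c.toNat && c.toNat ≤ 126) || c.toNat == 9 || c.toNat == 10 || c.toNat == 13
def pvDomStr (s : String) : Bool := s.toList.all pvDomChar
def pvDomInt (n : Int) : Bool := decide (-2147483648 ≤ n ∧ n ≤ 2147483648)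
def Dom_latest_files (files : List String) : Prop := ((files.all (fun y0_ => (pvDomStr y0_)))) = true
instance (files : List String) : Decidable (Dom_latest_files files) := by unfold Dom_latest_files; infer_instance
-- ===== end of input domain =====

-- B replaces A's overwrite-a-dict-then-read-its-insertion-order pass by a reverse first-wins pass plus a
-- forward seen-set emission pass (objective: alternative). Both A and B sort `files` in place (a caller-visible
-- mutation, performed identically by both); the equivalence proved here is about the return value.

-- Shared helper: the lines  items = f.split('_'); desc = '_'.join(items[:-1]); vers = items[-1]
-- appear verbatim in both Pythons. split('_') never raises (sep ≠ "", hence .getD []) and always returns a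
-- nonempty list, so items[-1] never raises (hence pyGetD with an irrelevant default "").
def pvDesc (file : String) : String :=
  PySem.Str.join "_" (PySem.List.slice ((PySem.Str.split? file "_").getD []) none (some (-1)))

def pvVers (file : String) : String :=
  PySem.List.pyGetD ((PySem.Str.split? file "_").getD []) (-1) ""

-- ===== PORT A =====
def latest_files (files : List String) : List String :=
  -- files.sort()
  let files := PySem.List.sorted files (fun f => f)
  -- file_dict = {}; for file in files: file_dict[desc] = vers
  let file_dict : PySem.Dict String String :=
    files.foldl (fun d file => d.insert (pvDesc file) (pvVers file)) PySem.Dict.empty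
  -- ['_'.join([desc, vers]) for desc, vers in file_dict.items()]
  file_dict.items.map (fun p => PySem.Str.join "_" [p.1, p.2])

-- ===== PORT B =====
def latest_files_alt (files : List String) : List String :=
  -- files.sort()
  let files := PySem.List.sorted files (fun f => f)
  -- latest = {}; for f in reversed(files): if desc not in latest: latest[desc] = items[-1]
  let latest : PySem.Dict String String :=
    files.reverse.foldl
      (fun d f => if d.contains (pvDesc f) then d else d.insert (pvDesc f) (pvVers f))
      PySem.Dict.empty
  -- out = []; seen = set(); for f in files: if desc not in seen: seen.add(desc); out.append('_'.join([desc, latest[desc]]))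
  -- latest[desc] never raises here (desc was put in by the first loop); ported as get? + getD "".
  let st : List String × PySem.Set String :=
    files.foldl
      (fun st f =>
        let desc := pvDesc f
        if st.2.contains desc then st
        else (st.1 ++ [PySem.Str.join "_" [desc, (latest.get? desc).getD ""]], st.2.add desc))
      ([], PySem.Set.empty)
  st.1

-- ===== PRECONDITION & SPEC =====
def Spec_latest_files (files : List String) (out : List String) : Prop := out = latest_files_alt files
instance (files : List String) (out : List String) : Decidable (Spec_latest_files files out) := by unfold Spec_latest_files; infer_instance

-- ===== CLAIM (what is proved, stated in full; the proofs are below) =====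
def Claim_equal_latest_files : Prop := ∀ (files : List String), Dom_latest_files files → Spec_latest_files files (latest_files files)

-- ===== LEMMAS AND PROOFS =====

-- A's overwrite loop: a lookup returns the LAST binding of the key (= first in the reversed list), else the start dict's value.
theorem pv_get_foldl_insert (k v : String → String) (x : String) :
    ∀ (s : List String) (d : PySem.Dict String String),
      (s.foldl (fun d f => d.insert (k f) (v f)) d).get? x
        = ((s.reverse.find? (fun f => k f == x)).map v).or (d.get? x) := by
  intro s
  induction s with
  | nil => intro d; simp
  | cons f s ih =>
    intro d
    simp only [List.foldl_cons, ih, List.reverse_cons, List.find?_append]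
    cases h : s.reverse.find? (fun f => k f == x) with
    | some g => simp [Option.or]
    | none =>
      simp only [Option.map_none, Option.none_or, PySem.Dict.get?_insert, List.find?]
      by_cases hkx : k f = x
      · subst hkx; simp [Option.or]
      · rw [show (k f == x) = false from beq_eq_false_iff_ne.mpr hkx]; simp [Ne.symm hkx]

-- B's first-wins loop: a lookup returns the start dict's value, else the FIRST binding of the key.
theorem pv_get_foldl_insert_if (k v : String → String) (x : String) :
    ∀ (s : List String) (d : PySem.Dict String String),
      (s.foldl (fun d f => if d.contains (k f) then d else d.insert (k f) (v f)) d).get? x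
        = (d.get? x).or ((s.find? (fun f => k f == x)).map v) := by
  intro s
  induction s with
  | nil => intro d; simp
  | cons f s ih =>
    intro d
    simp only [List.foldl_cons, List.find?]
    by_cases hc : d.contains (k f) = true
    · rw [if_pos hc, ih]
      by_cases hkx : k f = x
      · subst hkx
        rw [show (k f == k f) = true from beq_self_eq_true _]
        have hs : (d.get? (k f)).isSome := by rw [← PySem.Dict.contains_eq_isSome_get?]; exact hc
        obtain ⟨w, hw⟩ := Option.isSome_iff_exists.mp hs
        simp [hw, Option.or]
      · rw [show (k f == x) = false from beq_eq_false_iff_ne.mpr hkx]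
    · rw [if_neg hc, ih]
      by_cases hkx : k f = x
      · subst hkx
        have hn : d.get? (k f) = none := by
          have := PySem.Dict.contains_eq_isSome_get? d (k f)
          simp [hc] at this; exact this
        rw [PySem.Dict.get?_insert_self, hn,
            show (k f == k f) = true from beq_self_eq_true _]
        simp [Option.or]
      · rw [show (k f == x) = false from beq_eq_false_iff_ne.mpr hkx,
            PySem.Dict.get?_insert]
        simp [Ne.symm hkx]

-- The two dicts agree on every lookup (both are "value of the key's last occurrence in s").
theorem pv_dicts_agree (k v : String → String) (s : List String) (x : String) :
    (s.foldl (fun d f => d.insert (k f) (v f)) PySem.Dict.empty).get? x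
      = (s.reverse.foldl (fun d f => if d.contains (k f) then d else d.insert (k f) (v f)) PySem.Dict.empty).get? x := by
  rw [pv_get_foldl_insert, pv_get_foldl_insert_if]
  simp

-- Adding x to the seen set then filtering = filtering after discarding x.
theorem pv_filter_add (t : List String) (S : PySem.Set String) (x : String) :
    t.filter (fun y => !((S.add x).contains y))
      = (PySem.Set.discard t x).filter (fun y => !(S.contains y)) := by
  unfold PySem.Set.discard
  rw [List.filter_filter]
  apply List.filter_congr
  intro y hy
  cases hyx : (y == x) with
  | true =>
    have : y = x := by exact eq_of_beq hyx
    subst this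
    simp [PySem.Set.add, PySem.Set.contains]
    split <;> simp_all
  | false =>
    have hne : y ≠ x := by intro h; subst h; simp at hyx
    simp [PySem.Set.add, PySem.Set.contains]
    split <;> simp_all

-- If x is already seen, a discard of x under the filter changes nothing.
theorem pv_filter_mem (t : List String) (S : PySem.Set String) (x : String)
    (hc : S.contains x = true) :
    t.filter (fun y => !(S.contains y))
      = (PySem.Set.discard t x).filter (fun y => !(S.contains y)) := by
  unfold PySem.Set.discard
  rw [List.filter_filter]
  apply List.filter_congr
  intro y hy
  cases hyx : (y == x) with
  | true =>
    have : y = x := eq_of_beq hyx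
    subst this
    simp [(PySem.Set.contains_iff S y).mp hc]
  | false => simp only [Bool.not_false, Bool.and_true]

-- B's emission loop, accumulator generalized: it appends jf of the not-yet-seen keys in first-occurrence order.
theorem pv_emit_loop (k : String → String) (jf : String → String) :
    ∀ (s : List String) (out : List String) (S : PySem.Set String),
      (s.foldl
        (fun (st : List String × PySem.Set String) f =>
          if st.2.contains (k f) then st
          else (st.1 ++ [jf (k f)], st.2.add (k f)))
        (out, S)).1
      = out ++ ((PySem.Set.ofList (s.map k)).filter (fun y => !(S.contains y))).map jf := by
  intro s
  induction s with
  | nil => intro out S; simp [PySem.Set.ofList]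
  | cons f s ih =>
    intro out S
    simp only [List.foldl_cons, List.map_cons, PySem.Set.ofList_cons]
    by_cases hc : S.contains (k f) = true
    · rw [if_pos hc, ih, List.filter_cons_of_neg (by simp [(PySem.Set.contains_iff S (k f)).mp hc]),
          ← pv_filter_mem _ _ _ hc]
    · rw [if_neg hc, ih, List.filter_cons_of_pos (by simp only [PySem.Set.contains_iff] at hc ⊢; simpa using hc),
          pv_filter_add _ S (k f)]
      simp [List.append_assoc]

theorem pv_main (files : List String) : latest_files files = latest_files_alt files := by
  unfold latest_files latest_files_alt
  dsimp only
  set s := PySem.List.sorted files (fun f => f) with hs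
  set dA := s.foldl (fun d file => d.insert (pvDesc file) (pvVers file)) PySem.Dict.empty with hdA
  set L := s.reverse.foldl
      (fun d f => if d.contains (pvDesc f) then d else d.insert (pvDesc f) (pvVers f))
      PySem.Dict.empty with hL
  -- B side: unfold the emission loop
  rw [pv_emit_loop pvDesc (fun x => PySem.Str.join "_" [x, (L.get? x).getD ""]) s [] PySem.Set.empty]
  -- A side: items of the overwrite dict = distinct keys in first-occurrence order, paired with their lookup
  have hnd : dA.keys.Nodup := by
    rw [hdA]
    exact PySem.Dict.nodup_keys_foldl_insert_key s pvDesc (fun _ x => pvVers x) PySem.Dict.empty (by simp)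
  have hkeys : dA.keys = PySem.Set.ofList (s.map pvDesc) := by
    rw [hdA]
    rw [PySem.Dict.keys_foldl_insert_key s pvDesc (fun _ x => pvVers x) PySem.Dict.empty]
    exact PySem.Set.update_empty _
  rw [PySem.Dict.items_eq_map_keys dA hnd "", hkeys, List.map_map]
  have hfilter : (PySem.Set.ofList (s.map pvDesc)).filter (fun y => !(PySem.Set.empty.contains y))
      = PySem.Set.ofList (s.map pvDesc) := by
    simp [PySem.Set.contains, PySem.Set.empty]
  rw [hfilter]
  simp only [List.nil_append]
  apply List.map_congr_left
  intro x hx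
  simp only [Function.comp]
  congr 1
  rw [PySem.Dict.getD_eq_get?_getD]
  rw [pv_dicts_agree pvDesc pvVers s x]

-- ===== VERDICT (by name: the statement is the Claim_ definition above) =====
theorem latest_files_spec : Claim_equal_latest_files := by
  intro files _
  unfold Spec_latest_files
  exact pv_main files
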